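-- pv_equiv track=rewrite | github.com/canxphung/game4_battleship | ai.py | _group_hits
-- ===== SOURCE A (Python) =====
-- from typing import List, Tuple, Optional, Dict, Set
--
-- def _group_hits(hits: List[Tuple[int, int]]) -> List[List[Tuple[int, int]]]:
--     """Group hits into potential ships"""
--     if not hits:
--         return []
--
--     groups = []
--     used = set()
--
--     for hit in hits:
--         if hit in used:
--             continue
--
--         # Start new group
--         group = [hit]
--         used.add(hit)
--
--         # Find connected hits
--         changed = True
--         while changed:
--             changed = False
--             for other in hits:
--                 if other in used:
--                     continue
--
--                 # Check if connected to group
--                 for member in group: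
--                     if (abs(other[0] - member[0]) == 1 and other[1] == member[1]) or \
--                        (abs(other[1] - member[1]) == 1 and other[0] == member[0]):
--                         group.append(other)
--                         used.add(other)
--                         changed = True
--                         break
--
--         groups.append(sorted(group))
--
--     return groups
-- ===== SOURCE B (Python) =====
-- def _group_hits(hits):
--     """Group hits into potential ships: hash-set + DFS over the 4 grid neighbors."""
--     hitset = set(hits)
--     visited = set()
--     groups = []
--     for hit in hits:
--         if hit in visited:
--             continue
--         visited.add(hit)
--         comp = [hit]
--         stack = [hit]
--         while stack:
--             x, y = stack.pop()
--             for n in ((x + 1, y), (x - 1, y), (x, y + 1), (x, y - 1)):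
--                 if n in hitset and n not in visited:
--                     visited.add(n)
--                     comp.append(n)
--                     stack.append(n)
--         groups.append(sorted(comp))
--     return groups
-- ===== Notes on version B (the rewrite author's own statement) =====
-- stated objective: faster
-- what changed: Replaces A's repeated full rescans of the hit list with a fixed-point inner loop (re-testing every hit against every group member until nothing changes) by a hash-set of hits plus a stack-based DFS that probes only the 4 grid neighbors of each cell, so each hit is touched O(1) times.
import Mathlib
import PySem

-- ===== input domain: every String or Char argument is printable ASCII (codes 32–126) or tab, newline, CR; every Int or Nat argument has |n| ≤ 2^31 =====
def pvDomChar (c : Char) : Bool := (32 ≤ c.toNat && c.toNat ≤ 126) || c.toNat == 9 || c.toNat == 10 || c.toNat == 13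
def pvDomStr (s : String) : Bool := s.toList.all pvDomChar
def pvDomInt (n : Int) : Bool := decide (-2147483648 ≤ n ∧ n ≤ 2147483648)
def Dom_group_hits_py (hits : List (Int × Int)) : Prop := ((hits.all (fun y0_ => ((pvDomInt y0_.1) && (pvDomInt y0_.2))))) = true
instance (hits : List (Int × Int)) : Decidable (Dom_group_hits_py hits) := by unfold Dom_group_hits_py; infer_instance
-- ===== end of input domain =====

-- B replaces A's repeated full rescans of the hit list (fixed-point passes testing every
-- hit against every group member) by a hash-set of hits plus a stack-based DFS probing only
-- the 4 grid neighbors of each cell. Equivalence of the RETURN value is proved; neither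
-- program mutates its argument.

-- ===== PORT A =====
-- the adjacency test of A's innermost loop
def pvAdj (other member : Int × Int) : Bool :=
  ((other.1 - member.1).natAbs == 1 && other.2 == member.2)
  || ((other.2 - member.2).natAbs == 1 && other.1 == member.1)

-- one 'for other in hits' pass of A's 'while changed' loop; state = (group, used, changed)
def pvPassA (hits : List (Int × Int))
    (st : List (Int × Int) × PySem.Set (Int × Int) × Bool) :
    List (Int × Int) × PySem.Set (Int × Int) × Bool :=
  hits.foldl (fun st other =>
    if PySem.Set.contains st.2.1 other then st
    else if st.1.any (fun member => pvAdj other member) then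
      (st.1 ++ [other], PySem.Set.add st.2.1 other, true)
    else st) st

-- A's 'while changed' loop; fuel (hits.length + 1 at the call site) only makes it total:
-- every repeated pass adds at least one element of hits to 'used', so it never runs out
def pvSatA (hits : List (Int × Int)) :
    Nat → List (Int × Int) → PySem.Set (Int × Int) →
    List (Int × Int) × PySem.Set (Int × Int)
  | 0, g, u => (g, u)
  | fuel + 1, g, u =>
    let r := pvPassA hits (g, u, false)
    if r.2.2 then pvSatA hits fuel r.1 r.2.1 else (r.1, r.2.1)

def group_hits_py (hits : List (Int × Int)) : List (List (Int × Int)) :=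
  if hits.isEmpty then []
  else
    (hits.foldl (fun st hit =>
      if PySem.Set.contains st.2 hit then st
      else
        let r := pvSatA hits (hits.length + 1) [hit] (PySem.Set.add st.2 hit)
        (st.1 ++ [PySem.List.sorted2 r.1 Prod.fst Prod.snd false], r.2))
      ([], PySem.Set.empty)).1

-- ===== PORT B =====
-- the 4 grid neighbors probed by B (in B's tuple order)
def pvNbrs (p : Int × Int) : List (Int × Int) :=
  [(p.1 + 1, p.2), (p.1 - 1, p.2), (p.1, p.2 + 1), (p.1, p.2 - 1)]

-- B's 'while stack' DFS loop; the Python stack's top (end of the list, where append/pop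
-- act) is the HEAD of the Lean list. fuel (hits.length + 1 at the call site) only makes it
-- total: every iteration pops one element and each cell is pushed at most once
def pvDfs (hitset : PySem.Set (Int × Int)) :
    Nat → List (Int × Int) → List (Int × Int) → PySem.Set (Int × Int) →
    List (Int × Int) × PySem.Set (Int × Int)
  | 0, comp, _, vis => (comp, vis)
  | fuel + 1, comp, stack, vis =>
    match stack with
    | [] => (comp, vis)
    | p :: rest =>
      let st := (pvNbrs p).foldl (fun st n =>
        if PySem.Set.contains hitset n && !(PySem.Set.contains st.2.2 n) then
          (st.1 ++ [n], n :: st.2.1, PySem.Set.add st.2.2 n)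
        else st) (comp, rest, vis)
      pvDfs hitset fuel st.1 st.2.1 st.2.2

def group_hits_py_alt (hits : List (Int × Int)) : List (List (Int × Int)) :=
  let hitset := PySem.Set.ofList hits
  (hits.foldl (fun st hit =>
    if PySem.Set.contains st.2 hit then st
    else
      let r := pvDfs hitset (hits.length + 1) [hit] [hit] (PySem.Set.add st.2 hit)
      (st.1 ++ [PySem.List.sorted2 r.1 Prod.fst Prod.snd false], r.2))
    ([], PySem.Set.empty)).1

-- ===== PRECONDITION & SPEC =====
def Spec_group_hits_py (hits : List (Int × Int)) (out : List (List (Int × Int))) : Prop := out = group_hits_py_alt hits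
instance (hits : List (Int × Int)) (out : List (List (Int × Int))) : Decidable (Spec_group_hits_py hits out) := by unfold Spec_group_hits_py; infer_instance

-- ===== CLAIM (what is proved, stated in full; the proofs are below) =====
def Claim_equal_group_hits_py : Prop := ∀ (hits : List (Int × Int)), Dom_group_hits_py hits → Spec_group_hits_py hits (group_hits_py hits)

-- ===== LEMMAS AND PROOFS =====

-- x is connected to the seed s through cells of hits that are outside the set U
inductive pvReach (hits : List (Int × Int)) (U : Int × Int → Prop) (s : Int × Int) :
    Int × Int → Prop
  | base : pvReach hits U s s
  | step {y x : Int × Int} : pvReach hits U s y → x ∈ hits → ¬ U x →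
      pvAdj x y = true → pvReach hits U s x

theorem pvReach_congr {hits : List (Int × Int)} {U U' : Int × Int → Prop}
    {s x : Int × Int} (h : ∀ z, U z ↔ U' z) (hr : pvReach hits U s x) :
    pvReach hits U' s x := by
  induction hr with
  | base => exact .base
  | step hy hmem hnu hadj ih => exact .step ih hmem (fun hu => hnu ((h _).mpr hu)) hadj

-- a group that contains the seed, contains only reachable cells, and is adjacency-closed
-- is exactly the set of reachable cells
theorem pvMemUnique {hits : List (Int × Int)} {U : Int × Int → Prop} {s : Int × Int}
    {g : List (Int × Int)} (hseed : s ∈ g)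
    (hsub : ∀ x ∈ g, pvReach hits U s x)
    (hclosed : ∀ o ∈ hits, ¬ (U o ∨ o ∈ g) → ∀ m ∈ g, pvAdj o m = false) :
    ∀ x, x ∈ g ↔ pvReach hits U s x := by
  intro x
  constructor
  · exact hsub x
  · intro hr
    induction hr with
    | base => exact hseed
    | @step y z hy hmem hnu hadj ih =>
      by_cases hx : z ∈ g
      · exact hx
      · exact absurd (hclosed _ hmem (by tauto) _ ih) (by simp [hadj])

-- number of distinct hit cells not yet in u (the termination measure of both inner loops)
def pvCard (hits u : List (Int × Int)) : Nat := (hits.toFinset \ u.toFinset).card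

-- invariant of A's saturation loop: group is duplicate-free, used = u0 ∪ group,
-- every group member is reachable, and the seed is in the group
def pvInvA (hits u0 : List (Int × Int)) (s : Int × Int)
    (g : List (Int × Int)) (u : PySem.Set (Int × Int)) : Prop :=
  g.Nodup ∧ (∀ x, x ∈ u ↔ x ∈ u0 ∨ x ∈ g) ∧
  (∀ x ∈ g, pvReach hits (· ∈ u0) s x) ∧ s ∈ g

theorem pvPassA_fold (hits u0 : List (Int × Int)) (s : Int × Int) :
    ∀ (l : List (Int × Int)) (g : List (Int × Int)) (u : PySem.Set (Int × Int)) (c : Bool),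
    (∀ x ∈ l, x ∈ hits) → pvInvA hits u0 s g u →
    pvInvA hits u0 s (pvPassA l (g, u, c)).1 (pvPassA l (g, u, c)).2.1 ∧
    (∀ x ∈ u, x ∈ (pvPassA l (g, u, c)).2.1) ∧
    ((pvPassA l (g, u, c)).2.2 = false → pvPassA l (g, u, c) = (g, u, c)) ∧
    (c = false → (pvPassA l (g, u, c)).2.2 = true →
      ∃ x, x ∈ hits ∧ x ∉ u ∧ x ∈ (pvPassA l (g, u, c)).2.1) ∧
    ((pvPassA l (g, u, c)).2.2 = false →
      ∀ o ∈ l, o ∉ u → ∀ m ∈ g, pvAdj o m = false) := by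
  intro l
  induction l with
  | nil =>
    intro g u c hsub hinv
    refine ⟨hinv, fun x hx => hx, fun _ => rfl, fun hc htrue => ?_, fun _ o ho => ?_⟩
    · simp [pvPassA] at htrue; simp [htrue] at hc
    · simp at ho
  | cons other l ih =>
    intro g u c hsub hinv
    obtain ⟨hnd, hmem, hreach, hseed⟩ := hinv
    have hsub' : ∀ x ∈ l, x ∈ hits := fun x hx => hsub x (List.mem_cons_of_mem _ hx)
    by_cases hc : PySem.Set.contains u other = true
    · have hou : other ∈ u := by
        simpa [PySem.Set.contains] using hc
      have hfold : pvPassA (other :: l) (g, u, c) = pvPassA l (g, u, c) := by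
        simp [pvPassA, hou]
      obtain ⟨I1, I2, I3, I4, I5⟩ := ih g u c hsub' ⟨hnd, hmem, hreach, hseed⟩
      rw [hfold]
      refine ⟨I1, I2, I3, I4, fun hf o ho hounot m hm => ?_⟩
      rcases List.mem_cons.mp ho with h | h
      · exact absurd (h ▸ hou) hounot
      · exact I5 hf o h hounot m hm
    · have hou : other ∉ u := by
        simpa [PySem.Set.contains] using hc
      by_cases ha : g.any (fun m => pvAdj other m) = true
      · have hfold : pvPassA (other :: l) (g, u, c) =
            pvPassA l (g ++ [other], PySem.Set.add u other, true) := by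
          simp [pvPassA, hou, ha]
        have hog : other ∉ g := fun h => hou ((hmem other).mpr (Or.inr h))
        have hinv' : pvInvA hits u0 s (g ++ [other]) (PySem.Set.add u other) := by
          refine ⟨?_, ?_, ?_, List.mem_append_left _ hseed⟩
          · simp [List.nodup_append, hnd]
            exact fun a b hab he => hog (he ▸ hab)
          · intro x
            simp only [PySem.Set.mem_add _ _ _, List.mem_append, List.mem_singleton, hmem x]
            tauto
          · intro x hx
            rcases List.mem_append.mp hx with h | h
            · exact hreach x h
            · obtain ⟨m, hm, hadj⟩ := List.any_eq_true.mp ha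
              have hnu0 : other ∉ u0 := fun h0 => hou ((hmem other).mpr (Or.inl h0))
              exact (List.mem_singleton.mp h) ▸
                pvReach.step (hreach m hm) (hsub other List.mem_cons_self) hnu0 hadj
        obtain ⟨I1, I2, I3, I4, I5⟩ := ih (g ++ [other]) (PySem.Set.add u other) true hsub' hinv'
        rw [hfold]
        have hmono : ∀ x ∈ u, x ∈ (pvPassA l (g ++ [other], PySem.Set.add u other, true)).2.1 :=
          fun x hx => I2 x ((PySem.Set.mem_add _ _ _).mpr (Or.inl hx))
        refine ⟨I1, hmono, fun hf => ?_, fun _ _ => ?_, fun hf => ?_⟩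
        · have := I3 hf; rw [this] at hf; simp at hf
        · exact ⟨other, hsub other List.mem_cons_self, hou,
            I2 other ((PySem.Set.mem_add _ _ _).mpr (Or.inr rfl))⟩
        · have := I3 hf; rw [this] at hf; simp at hf
      · have hfold : pvPassA (other :: l) (g, u, c) = pvPassA l (g, u, c) := by
          simp [pvPassA, hou, ha]
        obtain ⟨I1, I2, I3, I4, I5⟩ := ih g u c hsub' ⟨hnd, hmem, hreach, hseed⟩
        rw [hfold]
        refine ⟨I1, I2, I3, I4, fun hf o ho hounot m hm => ?_⟩
        rcases List.mem_cons.mp ho with h | h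
        · subst h
          have := List.any_eq_false.mp (Bool.not_eq_true _ ▸ ha)
          simpa using (by simpa using (List.any_eq_false.mp (by simpa using ha)) m hm :
            ¬ pvAdj o m = true)
        · exact I5 hf o h hounot m hm

theorem pvSatA_spec (hits u0 : List (Int × Int)) (s : Int × Int) :
    ∀ (fuel : Nat) (g : List (Int × Int)) (u : PySem.Set (Int × Int)),
    pvInvA hits u0 s g u → pvCard hits u < fuel →
    pvInvA hits u0 s (pvSatA hits fuel g u).1 (pvSatA hits fuel g u).2 ∧
    (∀ o ∈ hits, o ∉ (pvSatA hits fuel g u).2 →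
      ∀ m ∈ (pvSatA hits fuel g u).1, pvAdj o m = false) := by
  intro fuel
  induction fuel with
  | zero => intro g u _ hcard; exact absurd hcard (Nat.not_lt_zero _)
  | succ fuel ih =>
    intro g u hinv hcard
    obtain ⟨I1, I2, I3, I4, I5⟩ := pvPassA_fold hits u0 s hits g u false (fun x hx => hx) hinv
    by_cases hchg : (pvPassA hits (g, u, false)).2.2 = true
    · have heq : pvSatA hits (fuel + 1) g u =
          pvSatA hits fuel (pvPassA hits (g, u, false)).1 (pvPassA hits (g, u, false)).2.1 := by
        simp [pvSatA, hchg]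
      obtain ⟨x, hxh, hxu, hxr⟩ := I4 rfl hchg
      have hsubF : hits.toFinset \ (pvPassA hits (g, u, false)).2.1.toFinset ⊆
          hits.toFinset \ u.toFinset := by
        intro z hz
        simp only [Finset.mem_sdiff, List.mem_toFinset] at hz ⊢
        exact ⟨hz.1, fun hzu => hz.2 (I2 z hzu)⟩
      have hlt : pvCard hits (pvPassA hits (g, u, false)).2.1 < pvCard hits u := by
        apply Finset.card_lt_card
        refine (Finset.ssubset_iff_of_subset hsubF).mpr ⟨x, ?_, ?_⟩
        · simp only [Finset.mem_sdiff, List.mem_toFinset]; exact ⟨hxh, hxu⟩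
        · simp only [Finset.mem_sdiff, List.mem_toFinset, not_and, not_not]
          exact fun _ => hxr
      rw [heq]
      exact ih _ _ I1 (Nat.lt_of_lt_of_le hlt (Nat.lt_succ_iff.mp hcard))
    · have hf : (pvPassA hits (g, u, false)).2.2 = false := by simpa using hchg
      have hr := I3 hf
      have heq : pvSatA hits (fuel + 1) g u = (g, u) := by
        simp [pvSatA, hr]
      rw [heq]
      exact ⟨hinv, fun o ho hou m hm => I5 hf o ho hou m hm⟩

-- A's per-seed result: the group is exactly the reachable set, used becomes u0 ∪ group
theorem pvSeedA (hits u0 : List (Int × Int)) (hit : Int × Int) :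
    (pvSatA hits (hits.length + 1) [hit] (PySem.Set.add u0 hit)).1.Nodup ∧
    (∀ x, x ∈ (pvSatA hits (hits.length + 1) [hit] (PySem.Set.add u0 hit)).1 ↔
      pvReach hits (· ∈ u0) hit x) ∧
    (∀ x, x ∈ (pvSatA hits (hits.length + 1) [hit] (PySem.Set.add u0 hit)).2 ↔
      x ∈ u0 ∨ x ∈ (pvSatA hits (hits.length + 1) [hit] (PySem.Set.add u0 hit)).1) := by
  have hinv0 : pvInvA hits u0 hit [hit] (PySem.Set.add u0 hit) := by
    refine ⟨List.nodup_singleton _, ?_, ?_, List.mem_singleton_self _⟩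
    · intro x; simp [PySem.Set.mem_add _ _ _]
    · intro x hx; exact (List.mem_singleton.mp hx) ▸ pvReach.base
  have hcard : pvCard hits (PySem.Set.add u0 hit) < hits.length + 1 :=
    Nat.lt_succ_of_le (Nat.le_trans (Finset.card_le_card Finset.sdiff_subset)
      (List.toFinset_card_le _))
  obtain ⟨⟨J1, J2, J3, J4⟩, J5⟩ :=
    pvSatA_spec hits u0 hit (hits.length + 1) [hit] (PySem.Set.add u0 hit) hinv0 hcard
  refine ⟨J1, ?_, J2⟩
  apply pvMemUnique J4 J3
  intro o ho hno m hm
  exact J5 o ho (fun h2 => hno ((J2 o).mp h2)) m hm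

theorem pvAdj_iff_mem_nbrs (n p : Int × Int) : pvAdj n p = true ↔ n ∈ pvNbrs p := by
  obtain ⟨a, b⟩ := n; obtain ⟨c, d⟩ := p
  simp [pvAdj, pvNbrs, Prod.ext_iff]
  omega

-- invariant of B's DFS loop: additionally every stack element is in comp and every
-- popped (comp, off-stack) member already has all its hit-neighbors visited
def pvInvB (hits u0 : List (Int × Int)) (s : Int × Int)
    (comp stack : List (Int × Int)) (vis : PySem.Set (Int × Int)) : Prop :=
  comp.Nodup ∧ (∀ x ∈ stack, x ∈ comp) ∧ (∀ x, x ∈ vis ↔ x ∈ u0 ∨ x ∈ comp) ∧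
  (∀ x ∈ comp, pvReach hits (· ∈ u0) s x) ∧ s ∈ comp ∧
  (∀ m ∈ comp, m ∉ stack → ∀ n, pvAdj n m = true → n ∈ hits → n ∈ vis)

theorem pvDfsStep_fold (hits u0 : List (Int × Int)) (s p : Int × Int)
    (hp : pvReach hits (· ∈ u0) s p) :
    ∀ (ns : List (Int × Int)) (comp stack : List (Int × Int)) (vis : PySem.Set (Int × Int)),
    (∀ n ∈ ns, pvAdj n p = true) →
    (comp.Nodup ∧ (∀ x ∈ stack, x ∈ comp) ∧ (∀ x, x ∈ vis ↔ x ∈ u0 ∨ x ∈ comp) ∧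
      (∀ x ∈ comp, pvReach hits (· ∈ u0) s x) ∧ s ∈ comp) →
    (let r := ns.foldl (fun st n =>
        if PySem.Set.contains (PySem.Set.ofList hits) n && !(PySem.Set.contains st.2.2 n) then
          (st.1 ++ [n], n :: st.2.1, PySem.Set.add st.2.2 n)
        else st) (comp, stack, vis)
     (r.1.Nodup ∧ (∀ x ∈ r.2.1, x ∈ r.1) ∧ (∀ x, x ∈ r.2.2 ↔ x ∈ u0 ∨ x ∈ r.1) ∧
       (∀ x ∈ r.1, pvReach hits (· ∈ u0) s x) ∧ s ∈ r.1) ∧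
     (∀ n ∈ ns, n ∈ hits → n ∈ r.2.2) ∧
     (∀ x ∈ vis, x ∈ r.2.2) ∧ (∀ x ∈ comp, x ∈ r.1) ∧
     (∀ x ∈ r.1, x ∈ comp ∨ x ∈ r.2.1) ∧ (∀ x ∈ stack, x ∈ r.2.1) ∧
     r.2.1.length + pvCard hits r.2.2 ≤ stack.length + pvCard hits vis) := by
  intro ns
  induction ns with
  | nil =>
    intro comp stack vis _ hinv
    exact ⟨hinv, by simp, fun x hx => hx, fun x hx => hx,
      fun x hx => Or.inl hx, fun x hx => hx, Nat.le_refl _⟩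
  | cons n ns ih =>
    intro comp stack vis hadj hinv
    obtain ⟨hnd, hstk, hvis, hreach, hseed⟩ := hinv
    have hadj' : ∀ m ∈ ns, pvAdj m p = true := fun m hm => hadj m (List.mem_cons_of_mem _ hm)
    have hcnd : (PySem.Set.contains (PySem.Set.ofList hits) n && !PySem.Set.contains vis n) = true
        ↔ (n ∈ hits ∧ n ∉ vis) := by
      simp [PySem.Set.contains, PySem.Set.mem_ofList]
    by_cases h : n ∈ hits ∧ n ∉ vis
    · have hc : (PySem.Set.contains (PySem.Set.ofList hits) n && !PySem.Set.contains vis n) = true :=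
        hcnd.mpr h
      simp only [List.foldl_cons, hc, if_true]
      have hnc : n ∉ comp := fun hcm => h.2 ((hvis n).mpr (Or.inr hcm))
      have hnu0 : n ∉ u0 := fun h0 => h.2 ((hvis n).mpr (Or.inl h0))
      have hinv' : (comp ++ [n]).Nodup ∧ (∀ x ∈ n :: stack, x ∈ comp ++ [n]) ∧
          (∀ x, x ∈ PySem.Set.add vis n ↔ x ∈ u0 ∨ x ∈ comp ++ [n]) ∧
          (∀ x ∈ comp ++ [n], pvReach hits (· ∈ u0) s x) ∧ s ∈ comp ++ [n] := by
        refine ⟨?_, ?_, ?_, ?_, List.mem_append_left _ hseed⟩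
        · simp [List.nodup_append, hnd]
          exact fun a b hab he => hnc (he ▸ hab)
        · intro x hx
          rcases List.mem_cons.mp hx with hx | hx
          · exact List.mem_append_right _ (by simp [hx])
          · exact List.mem_append_left _ (hstk x hx)
        · intro x
          simp only [PySem.Set.mem_add _ _ _, List.mem_append, List.mem_singleton, hvis x]
          tauto
        · intro x hx
          rcases List.mem_append.mp hx with hx | hx
          · exact hreach x hx
          · exact (List.mem_singleton.mp hx) ▸
              pvReach.step hp h.1 hnu0 (hadj n List.mem_cons_self)
      obtain ⟨K1, K2, K3, K4, K5, K6, K7⟩ :=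
        ih (comp ++ [n]) (n :: stack) (PySem.Set.add vis n) hadj' hinv'
      have hvmono : ∀ x ∈ vis, x ∈ _ := fun x hx => K3 x ((PySem.Set.mem_add _ _ _).mpr (Or.inl hx))
      refine ⟨K1, ?_, hvmono, ?_, ?_, ?_, ?_⟩
      · intro m hm hmh
        rcases List.mem_cons.mp hm with hm | hm
        · exact hm ▸ K3 n ((PySem.Set.mem_add _ _ _).mpr (Or.inr rfl))
        · exact K2 m hm hmh
      · exact fun x hx => K4 x (List.mem_append_left _ hx)
      · intro x hx
        rcases K5 x hx with hx' | hx'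
        · rcases List.mem_append.mp hx' with h2 | h2
          · exact Or.inl h2
          · have hxn : x = n := List.mem_singleton.mp h2
            subst hxn
            exact Or.inr (K6 x List.mem_cons_self)
        · exact Or.inr hx'
      · exact fun x hx => K6 x (List.mem_cons_of_mem _ hx)
      · have hlt : pvCard hits (PySem.Set.add vis n) < pvCard hits vis := by
          apply Finset.card_lt_card
          refine (Finset.ssubset_iff_of_subset ?_).mpr ⟨n, ?_, ?_⟩
          · intro z hz
            simp only [Finset.mem_sdiff, List.mem_toFinset] at hz ⊢
            exact ⟨hz.1, fun hzv => hz.2 ((PySem.Set.mem_add _ _ _).mpr (Or.inl hzv))⟩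
          · simp only [Finset.mem_sdiff, List.mem_toFinset]; exact h
          · simp only [Finset.mem_sdiff, List.mem_toFinset, not_and, not_not]
            exact fun _ => (PySem.Set.mem_add _ _ _).mpr (Or.inr rfl)
        have := K7
        simp only [List.length_cons] at this
        omega
    · have hc : (PySem.Set.contains (PySem.Set.ofList hits) n && !PySem.Set.contains vis n) = false := by
        cases hb : (PySem.Set.contains (PySem.Set.ofList hits) n && !PySem.Set.contains vis n)
        · rfl
        · exact absurd (hcnd.mp hb) h
      simp only [List.foldl_cons, hc, Bool.false_eq_true, if_false]
      obtain ⟨K1, K2, K3, K4, K5, K6, K7⟩ := ih comp stack vis hadj' ⟨hnd, hstk, hvis, hreach, hseed⟩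
      refine ⟨K1, ?_, K3, K4, K5, K6, K7⟩
      intro m hm hmh
      rcases List.mem_cons.mp hm with hm | hm
      · subst hm
        have : m ∈ vis := by
          by_contra hmv
          exact h ⟨hmh, hmv⟩
        exact K3 m this
      · exact K2 m hm hmh

theorem pvDfs_spec (hits u0 : List (Int × Int)) (s : Int × Int) :
    ∀ (fuel : Nat) (comp stack : List (Int × Int)) (vis : PySem.Set (Int × Int)),
    pvInvB hits u0 s comp stack vis → stack.length + pvCard hits vis < fuel →
    (pvDfs (PySem.Set.ofList hits) fuel comp stack vis).1.Nodup ∧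
    (∀ x, x ∈ (pvDfs (PySem.Set.ofList hits) fuel comp stack vis).2 ↔
      x ∈ u0 ∨ x ∈ (pvDfs (PySem.Set.ofList hits) fuel comp stack vis).1) ∧
    (∀ x ∈ (pvDfs (PySem.Set.ofList hits) fuel comp stack vis).1,
      pvReach hits (· ∈ u0) s x) ∧
    s ∈ (pvDfs (PySem.Set.ofList hits) fuel comp stack vis).1 ∧
    (∀ o ∈ hits, ¬ (o ∈ u0 ∨ o ∈ (pvDfs (PySem.Set.ofList hits) fuel comp stack vis).1) →
      ∀ m ∈ (pvDfs (PySem.Set.ofList hits) fuel comp stack vis).1, pvAdj o m = false) := by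
  intro fuel
  induction fuel with
  | zero => intro comp stack vis _ hm; exact absurd hm (Nat.not_lt_zero _)
  | succ fuel ih =>
    intro comp stack vis hinv hm
    obtain ⟨hnd, hstk, hvis, hreach, hseed, hcl⟩ := hinv
    cases stack with
    | nil =>
      have heq : pvDfs (PySem.Set.ofList hits) (fuel + 1) comp [] vis = (comp, vis) := by
        simp [pvDfs]
      rw [heq]
      refine ⟨hnd, hvis, hreach, hseed, ?_⟩
      intro o ho hno m hm'
      cases hb : pvAdj o m with
      | false => rfl
      | true =>
        exact absurd ((hvis o).mp (hcl m hm' (by simp) o hb ho)) hno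
    | cons p rest =>
      have hp := hreach p (hstk p List.mem_cons_self)
      have hadj : ∀ n ∈ pvNbrs p, pvAdj n p = true :=
        fun n hn => (pvAdj_iff_mem_nbrs n p).mpr hn
      have spec := pvDfsStep_fold hits u0 s p hp (pvNbrs p) comp rest vis hadj
        ⟨hnd, fun x hx => hstk x (List.mem_cons_of_mem _ hx), hvis, hreach, hseed⟩
      set r := (pvNbrs p).foldl (fun st n =>
        if PySem.Set.contains (PySem.Set.ofList hits) n && !(PySem.Set.contains st.2.2 n) then
          (st.1 ++ [n], n :: st.2.1, PySem.Set.add st.2.2 n)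
        else st) (comp, rest, vis) with hr
      obtain ⟨⟨K1, K2, K3, K4, K5⟩, Kn, Kv, Kc, Kcs, Ks, Km⟩ := spec
      have hunf : pvDfs (PySem.Set.ofList hits) (fuel + 1) comp (p :: rest) vis =
          pvDfs (PySem.Set.ofList hits) fuel r.1 r.2.1 r.2.2 := by
        simp [pvDfs, hr]
      rw [hunf]
      refine ih r.1 r.2.1 r.2.2 ⟨K1, K2, K3, K4, K5, ?_⟩ ?_
      · intro m hmc hms n hadjn hn
        rcases Kcs m hmc with hm' | hm'
        · by_cases hmp : m = p
          · subst hmp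
            exact Kn n ((pvAdj_iff_mem_nbrs n m).mp hadjn) hn
          · have hnotin : m ∉ p :: rest := by
              intro hmem
              rcases List.mem_cons.mp hmem with h | h
              · exact hmp h
              · exact hms (Ks m h)
            exact Kv n (hcl m hm' hnotin n hadjn hn)
        · exact absurd hm' hms
      · simp only [List.length_cons] at hm
        omega

-- B's per-seed result
theorem pvSeedB (hits u0 : List (Int × Int)) (hit : Int × Int)
    (hmem : hit ∈ hits) :
    (pvDfs (PySem.Set.ofList hits) (hits.length + 1) [hit] [hit] (PySem.Set.add u0 hit)).1.Nodup ∧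
    (∀ x, x ∈ (pvDfs (PySem.Set.ofList hits) (hits.length + 1) [hit] [hit] (PySem.Set.add u0 hit)).1 ↔
      pvReach hits (· ∈ u0) hit x) ∧
    (∀ x, x ∈ (pvDfs (PySem.Set.ofList hits) (hits.length + 1) [hit] [hit] (PySem.Set.add u0 hit)).2 ↔
      x ∈ u0 ∨ x ∈ (pvDfs (PySem.Set.ofList hits) (hits.length + 1) [hit] [hit] (PySem.Set.add u0 hit)).1) := by
  have hinv0 : pvInvB hits u0 hit [hit] [hit] (PySem.Set.add u0 hit) := by
    refine ⟨List.nodup_singleton _, fun x hx => hx, ?_, ?_, List.mem_singleton_self _, ?_⟩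
    · intro x; simp [PySem.Set.mem_add _ _ _]
    · intro x hx; exact (List.mem_singleton.mp hx) ▸ pvReach.base
    · intro m hm hms; exact absurd hm hms
  have hmeas : ([hit] : List (Int × Int)).length + pvCard hits (PySem.Set.add u0 hit) <
      hits.length + 1 := by
    have hsub : hits.toFinset \ (PySem.Set.add u0 hit).toFinset ⊆ hits.toFinset.erase hit := by
      intro z hz
      simp only [Finset.mem_sdiff, List.mem_toFinset, Finset.mem_erase] at hz ⊢
      exact ⟨fun he => hz.2 ((PySem.Set.mem_add _ _ _).mpr (Or.inr he)), hz.1⟩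
    have h1 : pvCard hits (PySem.Set.add u0 hit) ≤ (hits.toFinset.erase hit).card :=
      Finset.card_le_card hsub
    have h2 : (hits.toFinset.erase hit).card = hits.toFinset.card - 1 :=
      Finset.card_erase_of_mem (List.mem_toFinset.mpr hmem)
    have h3 : 1 ≤ hits.toFinset.card :=
      Finset.card_pos.mpr ⟨hit, List.mem_toFinset.mpr hmem⟩
    have h4 : hits.toFinset.card ≤ hits.length := List.toFinset_card_le _
    simp only [List.length_singleton]
    omega
  obtain ⟨J1, J2, J3, J4, J5⟩ :=
    pvDfs_spec hits u0 hit (hits.length + 1) [hit] [hit] (PySem.Set.add u0 hit) hinv0 hmeas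
  exact ⟨J1, pvMemUnique J4 J3 J5, J2⟩

-- Python's tuple comparison used by sorted2 on pairs, and its lexicographic orders
def pvBefore (a b : Int × Int) : Bool :=
  decide (a.1 < b.1) || (!decide (b.1 < a.1) && decide (a.2 < b.2))

def pvLexLE (a b : Int × Int) : Prop := a.1 < b.1 ∨ (a.1 = b.1 ∧ a.2 ≤ b.2)

theorem pvBefore_false_le {a b : Int × Int} (h : pvBefore a b = false) : pvLexLE b a := by
  obtain ⟨x1, y1⟩ := a; obtain ⟨x2, y2⟩ := b
  simp only [pvBefore, Bool.or_eq_false_iff, Bool.and_eq_false_iff, decide_eq_false_iff_not,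
    Bool.not_eq_false', decide_eq_true_eq] at h
  simp only [pvLexLE]
  omega

theorem pvBefore_true_le {a b : Int × Int} (h : pvBefore a b = true) : pvLexLE a b := by
  obtain ⟨x1, y1⟩ := a; obtain ⟨x2, y2⟩ := b
  simp only [pvBefore, Bool.or_eq_true, Bool.and_eq_true, decide_eq_true_eq,
    Bool.not_eq_true', decide_eq_false_iff_not] at h
  simp only [pvLexLE]
  omega

theorem pvLexLE_trans {a b c : Int × Int} (h1 : pvLexLE a b) (h2 : pvLexLE b c) : pvLexLE a c := by
  simp only [pvLexLE] at *; omega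

theorem pvInsertBy_pairwise (x : Int × Int) :
    ∀ (l : List (Int × Int)), l.Pairwise pvLexLE →
    (PySem.List.insertBy pvBefore x l).Pairwise pvLexLE := by
  intro l
  induction l with
  | nil => intro _; simp [PySem.List.insertBy]
  | cons y ys ihl =>
    intro h
    obtain ⟨hy, hys⟩ := List.pairwise_cons.mp h
    by_cases hb : pvBefore x y = true
    · have hxy := pvBefore_true_le hb
      simp only [PySem.List.insertBy, hb, if_true]
      exact List.pairwise_cons.mpr ⟨fun z hz => by
        rcases List.mem_cons.mp hz with h' | h'
        · exact h' ▸ hxy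
        · exact pvLexLE_trans hxy (hy z h'), h⟩
    · have hyx := pvBefore_false_le (Bool.not_eq_true _ ▸ hb : pvBefore x y = false)
      simp only [PySem.List.insertBy, hb]
      refine List.pairwise_cons.mpr ⟨fun z hz => ?_, ihl hys⟩
      rcases (List.Perm.mem_iff (PySem.List.insertBy_perm pvBefore x ys)).mp hz with h'
      rcases List.mem_cons.mp h' with h'' | h''
      · exact h'' ▸ hyx
      · exact hy z h''

theorem pvSorted2_pairwise (g : List (Int × Int)) :
    (PySem.List.sorted2 g Prod.fst Prod.snd false).Pairwise pvLexLE := by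
  have key : ∀ (l acc : List (Int × Int)), acc.Pairwise pvLexLE →
      (l.foldl (fun acc x => PySem.List.insertBy pvBefore x acc) acc).Pairwise pvLexLE := by
    intro l
    induction l with
    | nil => exact fun acc h => h
    | cons x xs ih => exact fun acc h => ih _ (pvInsertBy_pairwise x acc h)
  exact key g [] List.Pairwise.nil

-- two duplicate-free lists with the same members have the same Python sort
theorem pvSorted2_eq (g1 g2 : List (Int × Int)) (h1 : g1.Nodup) (h2 : g2.Nodup)
    (hmem : ∀ x, x ∈ g1 ↔ x ∈ g2) :
    PySem.List.sorted2 g1 Prod.fst Prod.snd false =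
      PySem.List.sorted2 g2 Prod.fst Prod.snd false := by
  have hperm : (PySem.List.sorted2 g1 Prod.fst Prod.snd false).Perm
      (PySem.List.sorted2 g2 Prod.fst Prod.snd false) :=
    (PySem.List.sorted2_perm g1 _ _ _).trans
      (((List.perm_ext_iff_of_nodup h1 h2).mpr hmem).trans
        (PySem.List.sorted2_perm g2 _ _ _).symm)
  refine List.Perm.eq_of_pairwise (le := pvLexLE) (fun a b _ _ hab hba => ?_)
    (pvSorted2_pairwise g1) (pvSorted2_pairwise g2) hperm
  obtain ⟨x1, y1⟩ := a; obtain ⟨x2, y2⟩ := b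
  simp only [pvLexLE, Prod.mk.injEq] at hab hba ⊢
  omega

theorem pvOuter_fold (hits : List (Int × Int)) :
    ∀ (l : List (Int × Int)) (gr : List (List (Int × Int)))
      (uA vB : PySem.Set (Int × Int)),
    (∀ x ∈ l, x ∈ hits) → (∀ x, x ∈ uA ↔ x ∈ vB) →
    (let rA := l.foldl (fun st hit =>
        if PySem.Set.contains st.2 hit then st
        else
          let r := pvSatA hits (hits.length + 1) [hit] (PySem.Set.add st.2 hit)
          (st.1 ++ [PySem.List.sorted2 r.1 Prod.fst Prod.snd false], r.2)) (gr, uA)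
     let rB := l.foldl (fun st hit =>
        if PySem.Set.contains st.2 hit then st
        else
          let r := pvDfs (PySem.Set.ofList hits) (hits.length + 1) [hit] [hit]
            (PySem.Set.add st.2 hit)
          (st.1 ++ [PySem.List.sorted2 r.1 Prod.fst Prod.snd false], r.2)) (gr, vB)
     rA.1 = rB.1 ∧ (∀ x, x ∈ rA.2 ↔ x ∈ rB.2)) := by
  intro l
  induction l with
  | nil => exact fun gr uA vB _ hiff => ⟨rfl, hiff⟩
  | cons hit l ih =>
    intro gr uA vB hsub hiff
    have hsub' : ∀ x ∈ l, x ∈ hits := fun x hx => hsub x (List.mem_cons_of_mem _ hx)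
    have hh : hit ∈ hits := hsub hit List.mem_cons_self
    by_cases hin : hit ∈ uA
    · have hinB : hit ∈ vB := (hiff hit).mp hin
      simp only [List.foldl_cons]
      have hcA : PySem.Set.contains uA hit = true := by simpa [PySem.Set.contains] using hin
      have hcB : PySem.Set.contains vB hit = true := by simpa [PySem.Set.contains] using hinB
      simp only [hcA, hcB, if_true]
      exact ih gr uA vB hsub' hiff
    · have hinB : hit ∉ vB := fun h => hin ((hiff hit).mpr h)
      simp only [List.foldl_cons]
      have hcA : PySem.Set.contains uA hit = false := by simpa [PySem.Set.contains] using hin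
      have hcB : PySem.Set.contains vB hit = false := by simpa [PySem.Set.contains] using hinB
      simp only [hcA, hcB, Bool.false_eq_true, if_false]
      obtain ⟨A1, A2, A3⟩ := pvSeedA hits uA hit
      obtain ⟨B1, B2, B3⟩ := pvSeedB hits vB hit hh
      have hcomp : ∀ x,
          x ∈ (pvSatA hits (hits.length + 1) [hit] (PySem.Set.add uA hit)).1 ↔
          x ∈ (pvDfs (PySem.Set.ofList hits) (hits.length + 1) [hit] [hit]
            (PySem.Set.add vB hit)).1 := by
        intro x
        rw [A2 x, B2 x]
        exact ⟨pvReach_congr (fun z => hiff z), pvReach_congr (fun z => (hiff z).symm)⟩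
      have hsort := pvSorted2_eq _ _ A1 B1 hcomp
      rw [hsort]
      apply ih
      · exact hsub'
      · intro x
        rw [A3 x, B3 x, hiff x, hcomp x]

-- ===== VERDICT (by name: the statement is the Claim_ definition above) =====
theorem group_hits_py_spec : Claim_equal_group_hits_py := by
  intro hits _
  unfold Spec_group_hits_py group_hits_py group_hits_py_alt
  rcases hits with _ | ⟨h0, t⟩
  · rfl
  · exact (pvOuter_fold (h0 :: t) (h0 :: t) [] [] [] (fun _ h => h) (fun _ => Iff.rfl)).1
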